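-- pv_equiv track=rewrite | github.com/signalnine/tildebin | scripts/baremetal/scheduler_affinity.py | parse_cpu_mask
-- ===== SOURCE A (Python) =====
-- def parse_cpu_mask(mask_str: str, num_cpus: int) -> list[int] | None:
--     """Parse CPU affinity mask to list of CPU IDs."""
--     try:
--         mask_str = mask_str.replace(',', '')
--         mask = int(mask_str, 16)
--         cpus = []
--         for i in range(num_cpus):
--             if mask & (1 << i):
--                 cpus.append(i)
--         return cpus
--     except ValueError:
--         return None
-- ===== SOURCE B (Python) =====
-- def parse_cpu_mask(mask_str: str, num_cpus: int) -> list[int] | None: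
--     """Parse CPU affinity mask to list of CPU IDs."""
--     try:
--         mask = int(mask_str.replace(',', ''), 16)
--     except ValueError:
--         return None
--     if num_cpus <= 0:
--         return []
--     # Keep only the in-range bits (also makes mask nonnegative), then walk
--     # ONLY the set bits via lowest-set-bit extraction.
--     mask &= (1 << num_cpus) - 1
--     cpus = []
--     while mask:
--         low = mask & -mask
--         cpus.append(low.bit_length() - 1)
--         mask ^= low
--     return cpus
-- ===== Notes on version B (the rewrite author's own statement) =====
-- stated objective: alternative
-- what changed: Instead of testing mask & (1 << i) for every i in range(num_cpus), B truncates the mask once to its low num_cpus bits and then iterates only over the SET bits, extracting each lowest set bit with mask & -mask and reading its position with bit_length(), so the loop runs popcount(mask) times instead of num_cpus times.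
import Mathlib
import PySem

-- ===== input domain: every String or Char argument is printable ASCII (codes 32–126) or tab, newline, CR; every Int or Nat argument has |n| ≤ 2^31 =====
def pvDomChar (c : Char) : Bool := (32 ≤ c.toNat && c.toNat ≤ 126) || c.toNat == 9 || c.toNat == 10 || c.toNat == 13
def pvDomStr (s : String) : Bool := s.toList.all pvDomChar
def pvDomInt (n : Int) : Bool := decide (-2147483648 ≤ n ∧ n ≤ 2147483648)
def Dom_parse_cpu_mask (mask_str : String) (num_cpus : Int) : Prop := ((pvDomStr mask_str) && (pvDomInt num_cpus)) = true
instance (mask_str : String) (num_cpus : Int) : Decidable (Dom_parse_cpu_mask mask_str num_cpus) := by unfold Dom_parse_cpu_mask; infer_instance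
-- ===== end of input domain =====

-- B truncates the mask once to its low num_cpus bits and then iterates only over the
-- SET bits, extracting each lowest set bit with mask & -mask and reading its position
-- with bit_length(), instead of testing mask & (1 << i) for every i < num_cpus.

-- ===== PORT A =====
def parse_cpu_mask (mask_str : String) (num_cpus : Int) : Option (List Int) :=
  match PySem.Int.ofStrBase? (PySem.Str.replace mask_str "," "") 16 with
  | none => none                                   -- except ValueError: return None
  | some mask =>
      -- for i in range(num_cpus): if mask & (1 << i): cpus.append(i)
      -- (i ≥ 0 for every element of the range, so i.toNat is exactly Python's i)
      some ((PySem.List.pyRange 0 num_cpus 1).foldl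
        (fun cpus i => if PySem.Int.band mask ((1 : Int) <<< i.toNat) ≠ 0 then cpus ++ [i] else cpus) [])

-- ===== PORT B =====
-- termination facts for the lowest-set-bit walk (used by pvLowWalk's decreasing_by)
theorem pv_odd_and (a : Nat) : (2 * a + 1) &&& (2 * a) = 2 * a := by
  apply Nat.eq_of_testBit_eq
  intro j
  cases j with
  | zero => simp [Nat.testBit_zero, Nat.mul_comm]
  | succ j =>
      rw [Nat.testBit_land, Nat.testBit_succ, Nat.testBit_succ]
      have h1 : (2 * a + 1) / 2 = a := by omega
      have h2 : 2 * a / 2 = a := by omega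
      rw [h1, h2, Bool.and_self]

theorem pv_even_and (a : Nat) : (2 * a) &&& (2 * a - 1) = 2 * (a &&& (a - 1)) := by
  apply Nat.eq_of_testBit_eq
  intro j
  cases j with
  | zero =>
      rw [Nat.testBit_land]
      simp [Nat.testBit_zero, Nat.mul_mod_right]
  | succ j =>
      rw [Nat.testBit_land, Nat.testBit_succ, Nat.testBit_succ, Nat.testBit_succ]
      have h1 : 2 * a / 2 = a := by omega
      have h2 : (2 * a - 1) / 2 = a - 1 := by omega
      have h3 : 2 * (a &&& (a - 1)) / 2 = a &&& (a - 1) := by omega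
      rw [h1, h2, h3, Nat.testBit_land]

theorem pv_low_char (m : Nat) (hm : m ≠ 0) :
    ∃ k, m &&& (m - 1) = m - 2 ^ k ∧ 2 ^ k ≤ m ∧ m.testBit k = true ∧
      ∀ j, j < k → m.testBit j = false := by
  induction m using Nat.strong_induction_on with
  | _ m ih =>
    rcases Nat.even_or_odd m with ⟨a, ha⟩ | ⟨a, ha⟩
    · -- m = 2a, a ≠ 0
      have ha2 : m = 2 * a := by omega
      have hane : a ≠ 0 := by omega
      obtain ⟨k, hand, hle, hbit, hlow⟩ := ih a (by omega) hane
      refine ⟨k + 1, ?_, by rw [ha2, pow_succ]; omega, ?_, ?_⟩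
      · rw [ha2, pv_even_and a, hand, pow_succ]; omega
      · rw [ha2, Nat.testBit_succ]
        have : 2 * a / 2 = a := by omega
        rw [this]; exact hbit
      · intro j hj
        cases j with
        | zero => rw [ha2]; simp [Nat.testBit_zero, Nat.mul_mod_right]
        | succ j =>
            rw [ha2, Nat.testBit_succ]
            have : 2 * a / 2 = a := by omega
            rw [this]; exact hlow j (by omega)
    · -- m = 2a + 1
      refine ⟨0, ?_, by omega, ?_, by omega⟩
      · have : m - 1 = 2 * a := by omega
        rw [this, ha, pv_odd_and]; omega
      · rw [ha]; simp [Nat.testBit_zero, Nat.mul_comm]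

theorem pv_band_neg (m : Nat) :
    PySem.Int.band (m : Int) (-(m : Int)) = ((m - (m &&& (m - 1)) : Nat) : Int) := by
  by_cases h0 : m = 0
  · subst h0; decide
  · unfold PySem.Int.band
    rw [if_pos (by positivity), if_neg (by omega)]
    have : (-(-(m : Int)) - 1) = ((m - 1 : Nat) : Int) := by push_cast [Nat.one_le_iff_ne_zero.mpr h0]; ring
    rw [this, Int.toNat_natCast, Int.toNat_natCast]

theorem pv_low_pow (m : Nat) (hm : m ≠ 0) :
    ∃ k, (PySem.Int.band (m : Int) (-(m : Int))) = ((2 ^ k : Nat) : Int) ∧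
      m.testBit k = true ∧ ∀ j, j < k → m.testBit j = false := by
  obtain ⟨k, hand, hle, hbit, hlow⟩ := pv_low_char m hm
  have hsub : m - (m - 2 ^ k) = 2 ^ k := Nat.sub_sub_self hle
  exact ⟨k, by rw [pv_band_neg, hand, hsub], hbit, hlow⟩

theorem pv_xor_low_lt (m : Nat) (h : ¬ m = 0) :
    m ^^^ (PySem.Int.band (m : Int) (-(m : Int))).toNat < m := by
  obtain ⟨k, hlow, hbit, -⟩ := pv_low_pow m h
  rw [hlow, Int.toNat_natCast]
  apply Nat.lt_of_testBit k
  · rw [Nat.testBit_xor, hbit, Nat.testBit_two_pow]; simp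
  · exact hbit
  · intro j hj
    rw [Nat.testBit_xor, Nat.testBit_two_pow, decide_eq_false (by omega)]
    simp

-- while mask: low = mask & -mask; cpus.append(low.bit_length() - 1); mask ^= low
-- (run on Nat: at the call site the truncated mask is nonnegative, so this is exact)
def pvLowWalk (m : Nat) : List Int :=
  if h : m = 0 then []
  else
    let low := PySem.Int.band (m : Int) (-(m : Int))
    ((PySem.Int.bitLength low - 1 : Nat) : Int) :: pvLowWalk (m ^^^ low.toNat)
  decreasing_by exact pv_xor_low_lt m h

def parse_cpu_mask_alt (mask_str : String) (num_cpus : Int) : Option (List Int) :=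
  match PySem.Int.ofStrBase? (PySem.Str.replace mask_str "," "") 16 with
  | none => none
  | some mask =>
      if num_cpus ≤ 0 then some []
      else
        -- mask &= (1 << num_cpus) - 1
        some (pvLowWalk (PySem.Int.band mask (((1 : Int) <<< num_cpus.toNat) - 1)).toNat)

-- ===== PRECONDITION & SPEC =====
def Spec_parse_cpu_mask (mask_str : String) (num_cpus : Int) (out : Option (List Int)) : Prop := out = parse_cpu_mask_alt mask_str num_cpus
instance (mask_str : String) (num_cpus : Int) (out : Option (List Int)) : Decidable (Spec_parse_cpu_mask mask_str num_cpus out) := by unfold Spec_parse_cpu_mask; infer_instance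

-- ===== CLAIM (what is proved, stated in full; the proofs are below) =====
def Claim_equal_parse_cpu_mask : Prop := ∀ (mask_str : String) (num_cpus : Int), Dom_parse_cpu_mask mask_str num_cpus → Spec_parse_cpu_mask mask_str num_cpus (parse_cpu_mask mask_str num_cpus)

-- ===== LEMMAS AND PROOFS =====

-- bit j of the (possibly negative, two's-complement) Python int mask
def pvBit (mask : Int) (j : Nat) : Bool :=
  if 0 ≤ mask then mask.toNat.testBit j else !((-mask - 1).toNat.testBit j)

lemma pv_shift_one (j : Nat) : (1 : Int) <<< (j : Int) = ((2 ^ j : Nat) : Int) := by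
  rw [Int.shiftLeft_eq_mul_pow]; push_cast; ring

lemma pv_shift_nat (n : Nat) : (1 : Int) <<< n = ((2 ^ n : Nat) : Int) := by
  rw [Int.shiftLeft_eq]; push_cast; ring

lemma pv_condA (mask : Int) (j : Nat) :
    (PySem.Int.band mask ((1 : Int) <<< (j : Int)) ≠ 0) ↔ pvBit mask j = true := by
  rw [pv_shift_one]
  have hb : (0:Int) ≤ ((2 ^ j : Nat) : Int) := by positivity
  by_cases h : 0 ≤ mask
  · have hband : PySem.Int.band mask ((2 ^ j : Nat) : Int) = ((mask.toNat &&& 2 ^ j : Nat) : Int) := by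
      unfold PySem.Int.band
      rw [if_pos h, if_pos hb, Int.toNat_natCast]
    rw [hband]
    unfold pvBit
    rw [if_pos h, Nat.and_two_pow]
    cases hbit : mask.toNat.testBit j <;> simp
  · have hband : PySem.Int.band mask ((2 ^ j : Nat) : Int)
        = ((2 ^ j - (2 ^ j &&& (-mask - 1).toNat) : Nat) : Int) := by
      unfold PySem.Int.band
      rw [if_neg h, if_pos hb, Int.toNat_natCast]
    rw [hband]
    unfold pvBit
    rw [if_neg h, Nat.and_comm, Nat.and_two_pow]
    have hp : 0 < 2 ^ j := Nat.two_pow_pos j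
    cases hbit : (-mask - 1).toNat.testBit j <;> simp

lemma pv_loopA (mask nc : Int) :
    (PySem.List.pyRange 0 nc 1).foldl
      (fun cpus i => if PySem.Int.band mask ((1 : Int) <<< i.toNat) ≠ 0 then cpus ++ [i] else cpus) []
    = ((List.range nc.toNat).filter (pvBit mask)).map (fun j : Nat => (j : Int)) := by
  simp only [PySem.List.pyRange_one, sub_zero, List.foldl_map, zero_add, Int.toNat_natCast]
  rw [PySem.List.foldl_congr_mem (List.range nc.toNat) _
        (fun (cpus : List Int) (k : Nat) => if pvBit mask k = true then cpus ++ [(k : Int)] else cpus) []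
        (by
          intro cpus k _
          show (if PySem.Int.band mask ((1 : Int) <<< (k : Int)) ≠ 0 then cpus ++ [(k : Int)] else cpus)
              = (if pvBit mask k = true then cpus ++ [(k : Int)] else cpus)
          by_cases hbit : pvBit mask k = true
          · rw [if_pos ((pv_condA mask k).mpr hbit), if_pos hbit]
          · rw [if_neg (fun hc => hbit ((pv_condA mask k).mp hc)), if_neg hbit])]
  rw [PySem.List.foldl_append_if (pvBit mask) (fun k : Nat => (k : Int)) (List.range nc.toNat) []]
  rw [List.nil_append]

lemma pv_sub_testBit (n : Nat) : ∀ (t j : Nat), t < 2 ^ n →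
    ((2 ^ n - 1) - t).testBit j = (decide (j < n) && ! t.testBit j) := by
  induction n with
  | zero =>
    intro t j ht
    interval_cases t
    simp
  | succ n ih =>
    intro t j ht
    have hp : 0 < 2 ^ n := Nat.two_pow_pos n
    have h2 : 2 ^ (n + 1) = 2 * 2 ^ n := by ring
    cases j with
    | zero =>
      simp only [Nat.testBit_zero]
      have hmod : (2 ^ (n + 1) - 1 - t) % 2 = 1 - t % 2 := by omega
      rw [hmod]
      rcases Nat.mod_two_eq_zero_or_one t with h | h <;> simp [h]
    | succ j =>
      rw [Nat.testBit_succ, Nat.testBit_succ]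
      have hdiv : (2 ^ (n + 1) - 1 - t) / 2 = 2 ^ n - 1 - t / 2 := by omega
      rw [hdiv, ih (t / 2) j (by omega)]
      simp

lemma pv_mB (mask : Int) (n : Nat) :
    0 ≤ PySem.Int.band mask (((1 : Int) <<< n) - 1) ∧
    (PySem.Int.band mask (((1 : Int) <<< n) - 1)).toNat < 2 ^ n ∧
    ∀ j : Nat, (PySem.Int.band mask (((1 : Int) <<< n) - 1)).toNat.testBit j
        = (decide (j < n) && pvBit mask j) := by
  have hp : 0 < 2 ^ n := Nat.two_pow_pos n
  have hones : ((1 : Int) <<< n) - 1 = ((2 ^ n - 1 : Nat) : Int) := by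
    rw [pv_shift_nat, Nat.cast_sub Nat.one_le_two_pow, Nat.cast_one]
  have hb : (0:Int) ≤ ((2 ^ n - 1 : Nat) : Int) := by positivity
  rw [hones]
  by_cases h : 0 ≤ mask
  · have hband : PySem.Int.band mask ((2 ^ n - 1 : Nat) : Int)
        = ((mask.toNat &&& (2 ^ n - 1) : Nat) : Int) := by
      unfold PySem.Int.band
      rw [if_pos h, if_pos hb, Int.toNat_natCast]
    rw [hband]
    have hle : mask.toNat &&& (2 ^ n - 1) ≤ 2 ^ n - 1 := Nat.and_le_right
    refine ⟨Int.natCast_nonneg _, ?_, ?_⟩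
    · rw [Int.toNat_natCast]; omega
    · intro j
      rw [Int.toNat_natCast, Nat.testBit_land, Nat.testBit_two_pow_sub_one]
      unfold pvBit
      rw [if_pos h, Bool.and_comm]
  · have hband : PySem.Int.band mask ((2 ^ n - 1 : Nat) : Int)
        = (((2 ^ n - 1) - ((2 ^ n - 1) &&& (-mask - 1).toNat) : Nat) : Int) := by
      unfold PySem.Int.band
      rw [if_neg h, if_pos hb, Int.toNat_natCast]
    rw [hband]
    have hle : (2 ^ n - 1) &&& (-mask - 1).toNat ≤ 2 ^ n - 1 := Nat.and_le_left
    refine ⟨Int.natCast_nonneg _, ?_, ?_⟩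
    · rw [Int.toNat_natCast]; omega
    · intro j
      rw [Int.toNat_natCast, pv_sub_testBit n _ j (by omega), Nat.testBit_land,
          Nat.testBit_two_pow_sub_one]
      unfold pvBit
      rw [if_neg h]
      cases hd : decide (j < n) <;> cases hw : (-mask - 1).toNat.testBit j <;> simp_all

lemma pv_bitLength_pow (k : Nat) : PySem.Int.bitLength ((2 ^ k : Nat) : Int) = k + 1 := by
  have h1 := PySem.Int.lt_two_pow_bitLength ((2 ^ k : Nat) : Int)
  have h2 := PySem.Int.two_pow_bitLength_le ((2 ^ k : Nat) : Int) (by positivity)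
  rw [Int.natAbs_natCast] at h1 h2
  have hk : k < PySem.Int.bitLength ((2 ^ k : Nat) : Int) :=
    (Nat.pow_lt_pow_iff_right (by norm_num)).mp h1
  have hk2 : PySem.Int.bitLength ((2 ^ k : Nat) : Int) - 1 ≤ k :=
    (Nat.pow_le_pow_iff_right (by norm_num)).mp h2
  omega

lemma pv_filter_split (K k : Nat) (p q : Nat → Bool) (hk : k < K)
    (hpq : ∀ j, p j = (decide (j = k) || q j)) (hq : ∀ j, j ≤ k → q j = false) :
    (List.range K).filter p = k :: (List.range K).filter q := by
  have hsplit : K = (k + 1) + (K - (k + 1)) := by omega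
  rw [hsplit, List.range_add, List.filter_append, List.filter_append]
  have hhead_p : (List.range (k + 1)).filter p = [k] := by
    rw [List.range_succ, List.filter_append, List.filter_eq_nil_iff.mpr
          (by intro j hj; rw [hpq j]
              simp [hq j (le_of_lt (List.mem_range.mp hj)),
                    Nat.ne_of_lt (List.mem_range.mp hj)])]
    simp [hpq k, hq k le_rfl]
  have hhead_q : (List.range (k + 1)).filter q = [] := by
    apply List.filter_eq_nil_iff.mpr
    intro j hj
    simp [hq j (Nat.lt_succ_iff.mp (List.mem_range.mp hj))]
  have htail : ((List.range (K - (k + 1))).map (fun x => k + 1 + x)).filter p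
      = ((List.range (K - (k + 1))).map (fun x => k + 1 + x)).filter q := by
    apply List.filter_congr
    intro j hj
    obtain ⟨x, -, rfl⟩ := List.mem_map.mp hj
    rw [hpq]
    simp [Nat.ne_of_gt (by omega : k < k + 1 + x)]
  rw [hhead_p, hhead_q, htail]
  simp

lemma pv_low_walk (K : Nat) : ∀ m : Nat, m < 2 ^ K →
    pvLowWalk m = ((List.range K).filter m.testBit).map (fun j : Nat => (j : Int)) := by
  intro m
  induction m using Nat.strong_induction_on with
  | _ m ih =>
    intro hm
    by_cases h0 : m = 0
    · subst h0; rw [pvLowWalk]; simp [Nat.zero_testBit]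
    · obtain ⟨k, hlow, hbit, hlower⟩ := pv_low_pow m h0
      have hkK : k < K := by
        by_contra hge
        have : m < 2 ^ k := lt_of_lt_of_le hm (Nat.pow_le_pow_right (by norm_num) (by omega))
        rw [Nat.testBit_lt_two_pow this] at hbit
        exact Bool.false_ne_true hbit
      rw [pvLowWalk, dif_neg h0]
      simp only [hlow, Int.toNat_natCast, pv_bitLength_pow, Nat.add_sub_cancel]
      have hlt : m ^^^ 2 ^ k < m := by
        have := pv_xor_low_lt m h0
        rwa [hlow, Int.toNat_natCast] at this
      rw [ih (m ^^^ 2 ^ k) hlt (lt_trans hlt hm)]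
      rw [pv_filter_split K k m.testBit (m ^^^ 2 ^ k).testBit hkK
            (by intro j
                rw [Nat.testBit_xor, Nat.testBit_two_pow]
                by_cases hjk : j = k
                · subst hjk; simp [hbit]
                · simp [Ne.symm hjk, fun h => hjk h]
                  )
            (by intro j hj
                rw [Nat.testBit_xor, Nat.testBit_two_pow]
                rcases Nat.lt_or_ge j k with hlt2 | hge2
                · simp [hlower j hlt2, Nat.ne_of_gt hlt2]
                · have : j = k := by omega
                  subst this; simp [hbit])]
      simp

-- ===== VERDICT (by name: the statement is the Claim_ definition above) =====
theorem parse_cpu_mask_spec : Claim_equal_parse_cpu_mask := by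
  intro mask_str num_cpus _
  unfold Spec_parse_cpu_mask parse_cpu_mask parse_cpu_mask_alt
  cases PySem.Int.ofStrBase? (PySem.Str.replace mask_str "," "") 16 with
  | none => rfl
  | some mask =>
      dsimp only
      rw [pv_loopA]
      by_cases hpos : num_cpus ≤ 0
      · rw [if_pos hpos]
        have h0 : num_cpus.toNat = 0 := Int.toNat_of_nonpos hpos
        rw [h0]
        simp
      · rw [if_neg hpos]
        obtain ⟨hge, hlt, hbitm⟩ := pv_mB mask num_cpus.toNat
        rw [pv_low_walk num_cpus.toNat _ hlt]
        have hfil : List.filter (PySem.Int.band mask (((1 : Int) <<< num_cpus.toNat) - 1)).toNat.testBit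
              (List.range num_cpus.toNat)
            = List.filter (pvBit mask) (List.range num_cpus.toNat) :=
          List.filter_congr (fun j hj => by
            rw [hbitm j, decide_eq_true (List.mem_range.mp hj), Bool.true_and])
        rw [hfil]
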